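-- pv_equiv track=rewrite | github.com/harithoppil/erp-aries-ai | backend/app/services/workflow_executor.py | _resolve_next_node
-- ===== SOURCE A (Python) =====
-- def _resolve_next_node(
--     current_key: str,
--     adjacency: dict[str, list[tuple[str, str | None]]],
--     context: dict,
-- ) -> str | None:
--     """Resolve the next node from the current node using edge conditions."""
--     edges = adjacency.get(current_key, [])
--     if not edges:
--         return None
--
--     # Check condition-based edges first
--     condition_result = context.get("condition_result")
--
--     for target_key, condition in edges:
--         if condition is None:
--             # Unconditional edge — default path
--             continue
--         if condition == condition_result:
--             return target_key
--
--     # Fall back to first unconditional edge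
--     for target_key, condition in edges:
--         if condition is None:
--             return target_key
--
--     # No matching edge found
--     return None
-- ===== SOURCE B (Python) =====
-- def _resolve_next_node(
--     current_key: str,
--     adjacency: dict[str, list[tuple[str, str | None]]],
--     context: dict,
-- ) -> str | None:
--     condition_result = context.get("condition_result")
--     fallback = None
--     for target_key, condition in adjacency.get(current_key, []):
--         if condition is not None:
--             if condition == condition_result:
--                 return target_key
--         elif fallback is None:
--             fallback = target_key
--     return fallback
-- ===== Notes on version B (the rewrite author's own statement) =====
-- stated objective: simpler
-- what changed: B replaces A's two sequential scans of the edge list (conditional matches first, then first unconditional edge) by a single pass that returns on a condition match and records the first unconditional edge as a fallback.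
import Mathlib
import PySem

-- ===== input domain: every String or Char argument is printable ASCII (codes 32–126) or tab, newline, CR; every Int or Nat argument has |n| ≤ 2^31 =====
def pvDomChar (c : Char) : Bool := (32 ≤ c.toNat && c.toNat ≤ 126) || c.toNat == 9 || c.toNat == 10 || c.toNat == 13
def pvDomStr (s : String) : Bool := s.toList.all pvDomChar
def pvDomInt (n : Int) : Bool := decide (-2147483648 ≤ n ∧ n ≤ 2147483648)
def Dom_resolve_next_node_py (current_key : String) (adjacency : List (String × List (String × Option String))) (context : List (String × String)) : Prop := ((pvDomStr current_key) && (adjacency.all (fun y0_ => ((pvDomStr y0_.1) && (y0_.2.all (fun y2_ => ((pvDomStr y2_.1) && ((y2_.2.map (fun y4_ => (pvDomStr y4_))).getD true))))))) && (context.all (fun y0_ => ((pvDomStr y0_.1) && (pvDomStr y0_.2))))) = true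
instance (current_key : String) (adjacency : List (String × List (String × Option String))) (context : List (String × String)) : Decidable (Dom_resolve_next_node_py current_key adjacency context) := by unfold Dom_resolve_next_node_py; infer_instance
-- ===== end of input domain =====

-- B merges A's two sequential scans of the edge list into a single pass with a fallback accumulator (objective: simpler).

-- ===== PORT A =====
-- first loop of A: first edge whose (non-None) condition equals condition_result
def pvALoop1 (edges : List (String × Option String)) (cr : Option String) : Option String :=
  match edges with
  | [] => none
  | (target, cond) :: rest =>
    match cond with
    | none => pvALoop1 rest cr                 -- unconditional edge — default path; continue
    | some c => if some c == cr then some target else pvALoop1 rest cr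

-- second loop of A: first unconditional edge
def pvALoop2 (edges : List (String × Option String)) : Option String :=
  match edges with
  | [] => none
  | (target, cond) :: rest =>
    match cond with
    | none => some target
    | some _ => pvALoop2 rest

def resolve_next_node_py (current_key : String) (adjacency : List (String × List (String × Option String))) (context : List (String × String)) : Option String :=
  let edges := PySem.Dict.getD (PySem.Dict.mk adjacency) current_key []
  if edges.isEmpty then none
  else
    let condition_result := PySem.Dict.get? (PySem.Dict.mk context) "condition_result"
    match pvALoop1 edges condition_result with
    | some t => some t
    | none =>
      match pvALoop2 edges with
      | some t => some t
      | none => none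

-- ===== PORT B =====
-- single pass: return on condition match, record first unconditional edge as fallback
def pvBLoop (edges : List (String × Option String)) (cr : Option String) (fallback : Option String) : Option String :=
  match edges with
  | [] => fallback
  | (target, cond) :: rest =>
    match cond with
    | some c => if some c == cr then some target else pvBLoop rest cr fallback
    | none =>
      match fallback with
      | none => pvBLoop rest cr (some target)
      | some _ => pvBLoop rest cr fallback

def resolve_next_node_py_alt (current_key : String) (adjacency : List (String × List (String × Option String))) (context : List (String × String)) : Option String :=
  let condition_result := PySem.Dict.get? (PySem.Dict.mk context) "condition_result"
  pvBLoop (PySem.Dict.getD (PySem.Dict.mk adjacency) current_key []) condition_result none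

-- ===== PRECONDITION & SPEC =====
def Spec_resolve_next_node_py (current_key : String) (adjacency : List (String × List (String × Option String))) (context : List (String × String)) (out : Option String) : Prop := out = resolve_next_node_py_alt current_key adjacency context
instance (current_key : String) (adjacency : List (String × List (String × Option String))) (context : List (String × String)) (out : Option String) : Decidable (Spec_resolve_next_node_py current_key adjacency context out) := by unfold Spec_resolve_next_node_py; infer_instance

-- ===== CLAIM (what is proved, stated in full; the proofs are below) =====
def Claim_equal_resolve_next_node_py : Prop := ∀ (current_key : String) (adjacency : List (String × List (String × Option String))) (context : List (String × String)), Dom_resolve_next_node_py current_key adjacency context → Spec_resolve_next_node_py current_key adjacency context (resolve_next_node_py current_key adjacency context)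

-- ===== LEMMAS AND PROOFS =====
-- B's single pass equals A's two scans, with the fallback accumulator standing for
-- "the first unconditional edge seen so far".
theorem pvBLoop_eq (edges : List (String × Option String)) (cr : Option String) (fb : Option String) :
    pvBLoop edges cr fb =
      match pvALoop1 edges cr with
      | some t => some t
      | none =>
        match fb with
        | some f => some f
        | none => pvALoop2 edges := by
  induction edges generalizing fb with
  | nil => cases fb <;> simp [pvBLoop, pvALoop1, pvALoop2]
  | cons e rest ih =>
    obtain ⟨target, cond⟩ := e
    cases cond with
    | none =>
      cases fb with
      | none =>
        simp only [pvBLoop, pvALoop1, ih]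
        cases pvALoop1 rest cr <;> simp [pvALoop2]
      | some f => simp [pvBLoop, pvALoop1, ih]
    | some c =>
      by_cases h : some c = cr
      · simp [pvBLoop, pvALoop1, h]
      · simp only [pvBLoop, pvALoop1, beq_iff_eq, if_neg h, ih]
        cases pvALoop1 rest cr <;> cases fb <;> simp [pvALoop2]

-- ===== VERDICT (by name: the statement is the Claim_ definition above) =====
theorem resolve_next_node_py_spec : Claim_equal_resolve_next_node_py := by
  intro ck adj ctx _
  unfold Spec_resolve_next_node_py resolve_next_node_py resolve_next_node_py_alt
  simp only [pvBLoop_eq]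
  cases h : PySem.Dict.getD (PySem.Dict.mk adj) ck [] with
  | nil => simp [pvALoop1, pvALoop2]
  | cons e rest =>
    cases pvALoop1 (e :: rest) (PySem.Dict.get? (PySem.Dict.mk ctx) "condition_result") <;>
      cases pvALoop2 (e :: rest) <;> simp
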